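-- pv_equiv track=rewrite | github.com/helmiiputraa/sbox-research-analyzer | backend/sbox_logic.py | apply_affine_transformation
-- ===== SOURCE A (Python) =====
-- def apply_affine_transformation(x_inv, matrix, constant):
--     """
--     Menerapkan Transformasi Afin: B(X) = (K . X^-1 + C) mod 2
--     Sumber Rumus:
--     """
--     x_inv_bin = format(x_inv, '08b')[::-1] # Ambil bit dari LSB ke MSB
--     result_bin = []
--
--     for row in matrix:
--         row_bin = format(row, '08b')[::-1]
--         # Perkalian dot product (AND) lalu jumlahkan mod 2 (XOR)
--         bit_sum = 0
--         for i in range(8):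
--             bit_sum ^= (int(x_inv_bin[i]) & int(row_bin[i]))
--         result_bin.append(str(bit_sum))
--
--     # Gabungkan bit hasil dan tambahkan konstanta (XOR)
--     res_int = int("".join(result_bin[::-1]), 2)
--     return res_int ^ constant
-- ===== SOURCE B (Python) =====
-- def apply_affine_transformation(x_inv, matrix, constant):
--     """B(X) = (K . X^-1 + C) mod 2, computed with integer bitwise ops instead of bit-strings."""
--     res = 0
--     for j, row in enumerate(matrix):
--         v = row & x_inv & 0xFF
--         v ^= v >> 4
--         v ^= v >> 2
--         v ^= v >> 1
--         res |= (v & 1) << j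
--     return res ^ constant
-- ===== Notes on version B (the rewrite author's own statement) =====
-- stated objective: idiomatic
-- what changed: Replaces A's bit-string formatting, string reversal, per-character int() parsing and join/int(...,2) reassembly by pure integer bitwise operations: mask the AND of row and x_inv to 8 bits, take its parity with an xor-shift fold, and OR the bit into position j of an integer accumulator.
-- outside the precondition, e.g. on apply_affine_transformation(9, [2, -394, 8, 195], 8): A returns 6, B returns 4; on apply_affine_transformation(-17867, [32, 130], 0): A returns 0, B returns 1; on apply_affine_transformation(7, [-5], 0): A raises ValueError, B returns 0
import Mathlib
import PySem

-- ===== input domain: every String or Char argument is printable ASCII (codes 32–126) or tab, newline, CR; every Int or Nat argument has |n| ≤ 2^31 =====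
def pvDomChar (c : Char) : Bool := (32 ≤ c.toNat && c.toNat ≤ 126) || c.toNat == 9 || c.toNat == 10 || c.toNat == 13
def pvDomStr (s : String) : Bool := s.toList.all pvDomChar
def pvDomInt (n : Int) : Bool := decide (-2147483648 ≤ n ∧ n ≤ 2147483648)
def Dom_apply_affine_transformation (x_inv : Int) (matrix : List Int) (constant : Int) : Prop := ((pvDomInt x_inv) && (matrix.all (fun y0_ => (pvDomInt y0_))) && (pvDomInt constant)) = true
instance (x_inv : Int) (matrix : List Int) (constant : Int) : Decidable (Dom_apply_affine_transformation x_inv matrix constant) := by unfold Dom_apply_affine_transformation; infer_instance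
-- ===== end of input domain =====

-- B replaces A's bit-string formatting and per-character inner loop by integer bitwise
-- operations (mask, xor-shift parity, or-accumulate); objective: idiomatic/alternative.

-- ===== PORT A =====
-- format(n,'b') digit list (MSB first) for n : Nat; the '0'/'1' characters of the Python
-- string are represented by their digit values 0/1 (the only uses are int(c) and int(_,2)),
-- exact for the nonnegative arguments admitted by Pre_ (a '-' character would make A raise).
def binDigits : Nat → List Nat
  | 0 => []
  | n+1 => binDigits ((n+1)/2) ++ [(n+1) % 2]
decreasing_by exact Nat.div_lt_self (Nat.succ_pos n) (by omega)

-- format(x, '08b')[::-1] as a digit list (pad to width 8 with leading zeros, then reverse)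
def fmt08bRev (x : Int) : List Nat :=
  (List.replicate (8 - (binDigits x.toNat).length) 0 ++ binDigits x.toNat).reverse

def apply_affine_transformation (x_inv : Int) (matrix : List Int) (constant : Int) : Int :=
  let x_inv_bin := fmt08bRev x_inv
  let result_bin := matrix.foldl (fun acc row =>
    let row_bin := fmt08bRev row
    let bit_sum := (List.range 8).foldl
      (fun s i => s ^^^ (x_inv_bin.getD i 0 &&& row_bin.getD i 0)) 0
    acc ++ [bit_sum]) ([]:List Nat)
  -- int("".join(result_bin[::-1]), 2): base-2 value of the digit list, MSB first
  let res_int := result_bin.reverse.foldl (fun a b => a * 2 + b) (0:Nat)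
  PySem.Int.bxor (res_int : Int) constant

-- ===== PORT B =====
def apply_affine_transformation_alt (x_inv : Int) (matrix : List Int) (constant : Int) : Int :=
  let res := (PySem.List.enumerate matrix).foldl (fun res jr =>
    let v := PySem.Int.band (PySem.Int.band jr.2 x_inv) 255
    let v := PySem.Int.bxor v (v >>> (4:Nat))
    let v := PySem.Int.bxor v (v >>> (2:Nat))
    let v := PySem.Int.bxor v (v >>> (1:Nat))
    PySem.Int.bor res (PySem.Int.band v 1 <<< jr.1.toNat)) 0   -- j ≥ 0, so (1 << j) is <<< j.toNat
  PySem.Int.bxor res constant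

-- ===== PRECONDITION & SPEC =====
-- Pre_ restricts to the function's natural domain (nonnegative values, a nonempty matrix):
-- on an empty matrix A raises ValueError (int("", 2)); on a negative x_inv or row A either
-- raises ValueError (int('-')) or, when the magnitude is large enough that the '-' sign falls
-- outside the 8 characters read, accidentally uses the bits of the absolute value, an artefact
-- of its sign-magnitude string formatting (B uses Python's two's-complement bitwise view there).
def Pre_apply_affine_transformation (x_inv : Int) (matrix : List Int) (constant : Int) : Prop :=
  0 ≤ x_inv ∧ matrix ≠ [] ∧ ∀ r ∈ matrix, 0 ≤ r
instance (x_inv : Int) (matrix : List Int) (constant : Int) : Decidable (Pre_apply_affine_transformation x_inv matrix constant) := by unfold Pre_apply_affine_transformation; infer_instance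

def pvWitness_apply_affine_transformation : Int × List Int × Int := (203, [241, 227, 199, 143, 31, 62, 124, 248], 99)

def Spec_apply_affine_transformation (x_inv : Int) (matrix : List Int) (constant : Int) (out : Int) : Prop := out = apply_affine_transformation_alt x_inv matrix constant
instance (x_inv : Int) (matrix : List Int) (constant : Int) (out : Int) : Decidable (Spec_apply_affine_transformation x_inv matrix constant out) := by unfold Spec_apply_affine_transformation; infer_instance

-- ===== CLAIM (what is proved, stated in full; the proofs are below) =====
def Claim_equal_apply_affine_transformation : Prop := ∀ (x_inv : Int) (matrix : List Int) (constant : Int), Dom_apply_affine_transformation x_inv matrix constant → Pre_apply_affine_transformation x_inv matrix constant → Spec_apply_affine_transformation x_inv matrix constant (apply_affine_transformation x_inv matrix constant)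


-- ===== LEMMAS AND PROOFS =====

-- x >>> i % 2 as a test-bit
theorem shiftRight_mod_two (x i : Nat) : x >>> i % 2 = (x.testBit i).toNat := by
  rw [Nat.testBit_eq_decide_div_mod_eq, Nat.shiftRight_eq_div_pow]
  rcases Nat.mod_two_eq_zero_or_one (x / 2 ^ i) with h | h <;> simp [h]

theorem binDigits_lt (n : Nat) : n < 2 ^ (binDigits n).length := by
  induction n using Nat.strong_induction_on with
  | _ n ih =>
    match n with
    | 0 => simp [binDigits]
    | m+1 =>
      rw [binDigits]
      have h2 := ih ((m+1)/2) (Nat.div_lt_self (Nat.succ_pos m) (by omega))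
      simp only [List.length_append, List.length_singleton, pow_succ]
      omega

-- digits of format(n,'b'), reversed, indexed: the i-th LSB
theorem binDigits_getD (n i : Nat) : (binDigits n).reverse.getD i 0 = n >>> i % 2 := by
  induction n using Nat.strong_induction_on generalizing i with
  | _ n ih =>
    match n with
    | 0 => simp [binDigits]
    | m+1 =>
      rw [binDigits]
      cases i with
      | zero => simp
      | succ j =>
        have h2 : (m+1) >>> (j+1) = ((m+1)/2) >>> j := by
          rw [Nat.shiftRight_eq_div_pow, Nat.shiftRight_eq_div_pow, pow_succ,
            Nat.mul_comm, ← Nat.div_div_eq_div_mul]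
        simp only [List.reverse_append, List.reverse_singleton, List.singleton_append,
          List.getD_cons_succ, h2]
        exact ih ((m+1)/2) (Nat.div_lt_self (Nat.succ_pos m) (by omega)) j

theorem fmt08bRev_getD (x : Int) (i : Nat) :
    (fmt08bRev x).getD i 0 = x.toNat >>> i % 2 := by
  unfold fmt08bRev
  rw [List.reverse_append]
  rcases Nat.lt_or_ge i (binDigits x.toNat).reverse.length with h | h
  · rw [List.getD_append _ _ _ _ h, binDigits_getD]
  · rw [List.getD_eq_getElem?_getD, List.getElem?_append_right h]
    have hz : ((List.replicate (8 - (binDigits x.toNat).length) (0:Nat)).reverse[i - (binDigits x.toNat).reverse.length]?).getD 0 = 0 := by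
      rcases Nat.lt_or_ge (i - (binDigits x.toNat).reverse.length) (8 - (binDigits x.toNat).length) with hj | hj
      · simp
      · rw [List.getElem?_eq_none (by simpa using hj)]; rfl
    rw [hz]
    have hlen := binDigits_lt x.toNat
    have : x.toNat >>> i = 0 := by
      rw [Nat.shiftRight_eq_div_pow]
      exact Nat.div_eq_of_lt (lt_of_lt_of_le hlen (Nat.pow_le_pow_right (by omega) (by simpa using h)))
    simp [this]

-- the per-row GF(2) dot product term, as a bit of the masked AND
theorem term_eq (a b i : Nat) (hi : i < 8) :
    (a >>> i % 2) &&& (b >>> i % 2) = ((a &&& b &&& 255) >>> i % 2) := by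
  rw [shiftRight_mod_two, shiftRight_mod_two, shiftRight_mod_two]
  have h255 : (255 : Nat).testBit i = true := by interval_cases i <;> decide
  rw [Nat.testBit_and, Nat.testBit_and, h255]
  cases a.testBit i <;> cases b.testBit i <;> decide

-- base-2 value of a digit list, LSB first
def bval : List Nat → Nat
  | [] => 0
  | x :: t => x + 2 * bval t

-- A's int("".join(·[::-1]), 2)
theorem revfold_eq_bval (L : List Nat) :
    L.reverse.foldl (fun a b => a * 2 + b) (0:Nat) = bval L := by
  induction L with
  | nil => rfl
  | cons x t ih => rw [List.reverse_cons, List.foldl_append, ih]; simp [bval]; omega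

-- the xor-shift parity chain of B, on Nat
def chainN (w : Nat) : Nat :=
  let v1 := w ^^^ (w >>> 4)
  let v2 := v1 ^^^ (v1 >>> 2)
  let v3 := v2 ^^^ (v2 >>> 1)
  v3 &&& 1

set_option maxRecDepth 8192 in
theorem chain_eq : ∀ w : Nat, w < 256 → chainN w =
    (((((((((0:Nat) ^^^ w>>>0%2) ^^^ w>>>1%2) ^^^ w>>>2%2) ^^^ w>>>3%2) ^^^ w>>>4%2) ^^^ w>>>5%2) ^^^ w>>>6%2) ^^^ w>>>7%2) := by decide

-- the common per-row parity bit
def pRow (a : Nat) (z : Int) : Nat := chainN (z.toNat &&& a &&& 255)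

theorem pRow_le_one (a : Nat) (z : Int) : pRow a z ≤ 1 := Nat.and_le_right

-- A's inner loop over the two reversed bit strings computes pRow
theorem rowA (x z : Int) :
    (List.range 8).foldl
      (fun s i => s ^^^ ((fmt08bRev x).getD i 0 &&& (fmt08bRev z).getD i 0)) (0:Nat)
    = pRow x.toNat z := by
  have hw : z.toNat &&& x.toNat &&& 255 < 256 :=
    Nat.lt_succ_of_le Nat.and_le_right
  have hrange : List.range 8 = [0,1,2,3,4,5,6,7] := rfl
  rw [hrange]
  simp only [List.foldl]
  rw [fmt08bRev_getD, fmt08bRev_getD, fmt08bRev_getD, fmt08bRev_getD, fmt08bRev_getD,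
    fmt08bRev_getD, fmt08bRev_getD, fmt08bRev_getD, fmt08bRev_getD, fmt08bRev_getD,
    fmt08bRev_getD, fmt08bRev_getD, fmt08bRev_getD, fmt08bRev_getD, fmt08bRev_getD,
    fmt08bRev_getD]
  rw [term_eq _ _ 0 (by omega), term_eq _ _ 1 (by omega), term_eq _ _ 2 (by omega),
    term_eq _ _ 3 (by omega), term_eq _ _ 4 (by omega), term_eq _ _ 5 (by omega),
    term_eq _ _ 6 (by omega), term_eq _ _ 7 (by omega)]
  rw [Nat.and_comm x.toNat z.toNat]
  exact (chain_eq _ hw).symm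

-- B's loop body (before the shift/or) computes pRow, as a cast
theorem rowB (x z : Int) (hx : 0 ≤ x) (hz : 0 ≤ z) :
    PySem.Int.band
      (let v := PySem.Int.band (PySem.Int.band z x) 255
       let v := PySem.Int.bxor v (v >>> (4:Nat))
       let v := PySem.Int.bxor v (v >>> (2:Nat))
       PySem.Int.bxor v (v >>> (1:Nat))) 1
    = ((pRow x.toNat z : Nat) : Int) := by
  have h0 : PySem.Int.band (PySem.Int.band z x) 255 = ((z.toNat &&& x.toNat &&& 255 : Nat) : Int) := by
    rw [PySem.Int.band_of_nonneg hz hx,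
        PySem.Int.band_of_nonneg (Int.natCast_nonneg _) (by norm_num)]
    rfl
  simp only [h0]
  have hsh : ∀ (m k : Nat), ((m:Int) >>> k) = ((m >>> k : Nat) : Int) := fun _ _ => rfl
  rw [hsh, PySem.Int.bxor_natCast, hsh, PySem.Int.bxor_natCast, hsh, PySem.Int.bxor_natCast]
  have h1 : (1:Int) = ((1:Nat):Int) := rfl
  rw [h1, PySem.Int.band_natCast]
  rfl

-- B's enumerate/or-accumulate loop, generalized over start index and accumulator
theorem B_loop (F : Int → Int) (p : Int → Nat) (hp : ∀ z, p z ≤ 1) :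
    ∀ (l : List Int) (s r : Nat), (∀ z ∈ l, F z = ((p z : Nat) : Int)) → r < 2 ^ s →
    (PySem.List.enumerate l (s:Int)).foldl
      (fun res jr => PySem.Int.bor res (F jr.2 <<< jr.1.toNat)) ((r:Nat):Int)
    = (((r + 2 ^ s * bval (l.map p) : Nat)) : Int) := by
  intro l
  induction l with
  | nil => intro s r _ _; simp [PySem.List.enumerate, bval]
  | cons z t ih =>
    intro s r hF hr
    rw [PySem.List.enumerate_cons]
    simp only [List.foldl]
    have hcast : ((s:Int) + 1) = ((s+1 : Nat) : Int) := by push_cast; ring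
    have hstep : PySem.Int.bor ((r:Nat):Int) (F z <<< ((((s:Int)).toNat : Nat) : Int))
        = (((r + p z * 2 ^ s : Nat)) : Int) := by
      rw [hF z (by simp), Int.toNat_natCast, Int.shiftLeft_natCast,
        PySem.Int.bor_natCast, Nat.lor_comm,
        ← Nat.shiftLeft_add_eq_or_of_lt hr, Nat.shiftLeft_eq]
      rw [Nat.add_comm]
    have hr' : r + p z * 2 ^ s < 2 ^ (s+1) := by
      rcases Nat.le_one_iff_eq_zero_or_eq_one.mp (hp z) with h | h <;>
        rw [h, pow_succ] <;> omega
    rw [hstep, hcast, ih (s+1) (r + p z * 2 ^ s) (fun w hw => hF w (by simp [hw])) hr']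
    congr 1
    simp only [List.map_cons, bval]
    rw [pow_succ]
    ring
-- ===== VERDICT (by name: the statement is the Claim_ definition above) =====
theorem apply_affine_transformation_spec : Claim_equal_apply_affine_transformation := by
  intro x m c _ hpre
  obtain ⟨hx, -, hall⟩ := hpre
  unfold Spec_apply_affine_transformation
  unfold apply_affine_transformation apply_affine_transformation_alt
  simp only []
  rw [PySem.List.foldl_append_singleton_eq_map, List.nil_append, revfold_eq_bval]
  have hA : (m.map (fun row => (List.range 8).foldl
      (fun s i => s ^^^ ((fmt08bRev x).getD i 0 &&& (fmt08bRev row).getD i 0)) 0))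
      = m.map (pRow x.toNat) := List.map_congr_left (fun z _ => rowA x z)
  rw [hA]
  have hB := B_loop (fun z =>
      PySem.Int.band
        (let v := PySem.Int.band (PySem.Int.band z x) 255
         let v := PySem.Int.bxor v (v >>> (4:Nat))
         let v := PySem.Int.bxor v (v >>> (2:Nat))
         PySem.Int.bxor v (v >>> (1:Nat))) 1)
    (pRow x.toNat) (pRow_le_one _) m 0 0
    (fun z hz => rowB x z hx (hall z hz)) (by norm_num)
  simp only [Nat.cast_zero] at hB
  rw [hB]
  norm_num
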